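-- pv_equiv track=rewrite | github.com/benshabbat/Tutorials | python-analiza/week_zero/fname_lname.py | count_by_level
-- ===== SOURCE A (Python) =====
-- def count_by_level(log_dicts: list[dict]) -> dict:
--     # obj_levels = {'DEBUG': 0, 'INFO': 0, 'WARN': 0, 'ERROR': 0, 'FATAL': 0, 'ALERT': 0}
--     # for log in log_dicts:
--     #     level = log.get('level')
--     #     if level in obj_levels:
--     #         obj_levels[level] += 1
--
--     # for level in obj_levels:
--     #     if obj_levels[level] == 0:
--     #         del obj_levels[level]
--     # return obj_levels
--
--     levels = [ 'DEBUG', 'INFO', 'ALERT', 'FATAL', 'WARN', 'ERROR']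
--     obj_levels = {}
--     for log in log_dicts:
--         level = log.get('level')
--         if level in levels:
--             if level not in obj_levels.keys():
--                 obj_levels[level] = 1
--             else:
--                 obj_levels[level] += 1
--     return obj_levels
-- ===== SOURCE B (Python) =====
-- KNOWN_LEVELS = ('DEBUG', 'INFO', 'ALERT', 'FATAL', 'WARN', 'ERROR')
--
-- def count_by_level(log_dicts):
--     seq = [log.get('level') for log in log_dicts]
--     seq = [lvl for lvl in seq if lvl in KNOWN_LEVELS]
--     return {lvl: seq.count(lvl) for lvl in dict.fromkeys(seq)}
-- ===== Notes on version B (the rewrite author's own statement) =====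
-- stated objective: alternative
-- what changed: A counts in one build-as-you-go loop over the logs, branching on whether the level key already exists in the result dict; B instead extracts the list of known levels, deduplicates it with dict.fromkeys, and builds the result in a comprehension pairing each distinct level with a seq.count pass.
import Mathlib
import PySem

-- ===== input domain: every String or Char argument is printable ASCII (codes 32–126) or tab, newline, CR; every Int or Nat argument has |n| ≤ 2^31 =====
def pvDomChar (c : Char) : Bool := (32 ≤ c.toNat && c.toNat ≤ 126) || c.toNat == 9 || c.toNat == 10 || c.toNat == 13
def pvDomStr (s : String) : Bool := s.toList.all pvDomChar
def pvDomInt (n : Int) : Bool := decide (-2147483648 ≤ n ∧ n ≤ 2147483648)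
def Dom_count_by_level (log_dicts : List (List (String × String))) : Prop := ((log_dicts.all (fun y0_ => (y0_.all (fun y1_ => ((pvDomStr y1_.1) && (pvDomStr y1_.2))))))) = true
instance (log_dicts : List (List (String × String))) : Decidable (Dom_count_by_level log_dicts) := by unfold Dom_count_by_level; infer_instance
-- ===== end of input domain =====

-- B builds the result from a deduplicated level list plus per-level count passes instead of
-- A's single branch-on-membership accumulation loop; same cost class, different decomposition.

-- ===== PORT A =====
-- levels = ['DEBUG', 'INFO', 'ALERT', 'FATAL', 'WARN', 'ERROR']
def pvLevels : List String := ["DEBUG", "INFO", "ALERT", "FATAL", "WARN", "ERROR"]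

-- the body of A's `for log in log_dicts` loop, acting on the dict obj_levels
def pvStepA (obj : PySem.Dict String Int) (log : List (String × String)) : PySem.Dict String Int :=
  match (PySem.Dict.ofList log).get? "level" with   -- level = log.get('level'); None never ∈ levels
  | none => obj
  | some lvl =>
      if lvl ∈ pvLevels then
        if (PySem.Dict.contains obj lvl) = false then
          obj.insert lvl 1
        else
          obj.insert lvl (obj.getD lvl 0 + 1)       -- obj_levels[level] += 1 (key present)
      else obj

def count_by_level (log_dicts : List (List (String × String))) : List (String × Int) :=
  (log_dicts.foldl pvStepA PySem.Dict.empty).items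

-- ===== PORT B =====
-- KNOWN_LEVELS = ('DEBUG', 'INFO', 'ALERT', 'FATAL', 'WARN', 'ERROR')
def pvKnownLevels : List String := ["DEBUG", "INFO", "ALERT", "FATAL", "WARN", "ERROR"]

def count_by_level_alt (log_dicts : List (List (String × String))) : List (String × Int) :=
  let seq := log_dicts.map (fun log => (PySem.Dict.ofList log).get? "level")
  let seq2 := seq.filterMap (fun o => o.bind (fun l => if l ∈ pvKnownLevels then some l else none))
  (PySem.List.dedup seq2).map (fun lvl => (lvl, (seq2.count lvl : Int)))

-- ===== PRECONDITION & SPEC =====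
def Spec_count_by_level (log_dicts : List (List (String × String))) (out : List (String × Int)) : Prop := out = count_by_level_alt log_dicts
instance (log_dicts : List (List (String × String))) (out : List (String × Int)) : Decidable (Spec_count_by_level log_dicts out) := by unfold Spec_count_by_level; infer_instance

-- ===== CLAIM (what is proved, stated in full; the proofs are below) =====
def Claim_equal_count_by_level : Prop := ∀ (log_dicts : List (List (String × String))), Dom_count_by_level log_dicts → Spec_count_by_level log_dicts (count_by_level log_dicts)

-- ===== LEMMAS AND PROOFS =====

-- the level (if any) extracted from one log that A counts
def pvExtract (log : List (String × String)) : Option String :=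
  ((PySem.Dict.ofList log).get? "level").bind (fun l => if l ∈ pvLevels then some l else none)

-- A's branch collapses to the uniform counter step
lemma pvStepA_eq (obj : PySem.Dict String Int) (log : List (String × String)) :
    pvStepA obj log =
      match pvExtract log with
      | none => obj
      | some l => obj.insert l (obj.getD l 0 + 1) := by
  unfold pvStepA pvExtract
  cases h : (PySem.Dict.ofList log).get? "level" with
  | none => rfl
  | some lvl =>
      simp only [Option.bind_some]
      by_cases hm : lvl ∈ pvLevels
      · simp only [hm, if_true]
        by_cases hc : PySem.Dict.contains obj lvl = false
        · have : obj.getD lvl 0 = 0 := by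
            unfold PySem.Dict.getD
            have := (PySem.Dict.get?_eq_none_iff_contains (d := obj) (k := lvl)).mpr (by simp [hc])
            simp [this]
          simp [hc, this]
        · simp [hc]
      · simp [hm]

lemma pvFoldA (logs : List (List (String × String))) (d : PySem.Dict String Int) :
    logs.foldl pvStepA d =
      (logs.filterMap pvExtract).foldl (fun d x => d.insert x (d.getD x 0 + 1)) d := by
  induction logs generalizing d with
  | nil => rfl
  | cons log rest ih =>
      simp only [List.foldl_cons, List.filterMap_cons, pvStepA_eq]
      cases pvExtract log with
      | none => exact ih d
      | some l => simpa using ih (d.insert l (d.getD l 0 + 1))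

-- ===== VERDICT (by name: the statement is the Claim_ definition above) =====
theorem count_by_level_spec : Claim_equal_count_by_level := by
  intro logs _
  show count_by_level logs = count_by_level_alt logs
  unfold count_by_level count_by_level_alt
  rw [pvFoldA, PySem.Dict.foldl_insert_getD_add_one_eq_counter, PySem.Dict.items_counter]
  simp [pvExtract, List.filterMap_map, pvKnownLevels, pvLevels]
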